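-- pv_equiv track=rewrite | github.com/pcostam/PRI | exercise-4.py | get_keyphrases
-- ===== SOURCE A (Python) =====
-- def get_keyphrases(y_pred, feature_names):
--     keyphrases = list()
--     i = 0
--     for label in y_pred:
--         if label == 1:
--             keyphrases.append(feature_names[i])
--             i += 1
--
--     return keyphrases
-- ===== SOURCE B (Python) =====
-- def get_keyphrases(y_pred, feature_names):
--     # A only ever appends feature_names[0], feature_names[1], ... in order:
--     # the result is the first k feature names, where k = number of labels equal to 1.
--     k = sum(1 for label in y_pred if label == 1)
--     return [feature_names[j] for j in range(k)]
-- ===== Notes on version B (the rewrite author's own statement) =====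
-- stated objective: simpler
-- what changed: B replaces A's single loop with a manual index counter by a count of labels equal to 1 followed by taking the first k feature names by index, eliminating the accumulated list/index state.
import Mathlib
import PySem

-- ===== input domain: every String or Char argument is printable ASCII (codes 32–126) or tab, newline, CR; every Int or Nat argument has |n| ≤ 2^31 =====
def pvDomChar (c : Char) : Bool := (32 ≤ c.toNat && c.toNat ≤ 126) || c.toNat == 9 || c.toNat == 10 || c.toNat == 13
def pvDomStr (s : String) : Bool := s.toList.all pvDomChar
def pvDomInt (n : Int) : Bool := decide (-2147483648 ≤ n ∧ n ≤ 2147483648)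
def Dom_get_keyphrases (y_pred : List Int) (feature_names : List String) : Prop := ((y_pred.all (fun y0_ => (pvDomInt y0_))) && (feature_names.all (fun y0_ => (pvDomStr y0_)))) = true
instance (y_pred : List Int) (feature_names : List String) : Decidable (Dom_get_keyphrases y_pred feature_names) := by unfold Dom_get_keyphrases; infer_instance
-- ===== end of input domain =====

-- B replaces A's loop-with-index-counter by counting the 1-labels and then taking the
-- first k feature names by index (objective: simpler).

-- ===== PORT A =====
-- A's loop: accumulate keyphrases and the index i; feature_names[i] may raise
-- (pyGet? = none), which Pre_ excludes; the 'none' branch leaves the state unchanged.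
def get_keyphrases (y_pred : List Int) (feature_names : List String) : List String :=
  (y_pred.foldl
    (fun (st : List String × Int) (label : Int) =>
      if label = 1 then
        match PySem.List.pyGet? feature_names st.2 with
        | some v => (st.1 ++ [v], st.2 + 1)
        | none => st
      else st)
    ([], 0)).1

-- ===== PORT B =====
-- B: count the labels equal to 1, then [feature_names[j] for j in range(k)];
-- the .getD "" covers only the IndexError case, which Pre_ excludes.
def get_keyphrases_alt (y_pred : List Int) (feature_names : List String) : List String :=
  let k : Int := y_pred.foldl (fun s label => if label = 1 then s + 1 else s) 0
  (PySem.List.pyRange 0 k 1).map (fun j => (PySem.List.pyGet? feature_names j).getD "")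

-- ===== PRECONDITION & SPEC =====
-- Pre_ excludes inputs where A raises IndexError: the number of labels equal to 1
-- must not exceed the number of feature names (B raises there as well).
def Pre_get_keyphrases (y_pred : List Int) (feature_names : List String) : Prop :=
  y_pred.count 1 ≤ feature_names.length
instance (y_pred : List Int) (feature_names : List String) : Decidable (Pre_get_keyphrases y_pred feature_names) := by unfold Pre_get_keyphrases; infer_instance

def pvWitness_get_keyphrases : List Int × List String := ([1, 0, 1, 2], ["a", "b", "c"])

def Spec_get_keyphrases (y_pred : List Int) (feature_names : List String) (out : List String) : Prop := out = get_keyphrases_alt y_pred feature_names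
instance (y_pred : List Int) (feature_names : List String) (out : List String) : Decidable (Spec_get_keyphrases y_pred feature_names out) := by unfold Spec_get_keyphrases; infer_instance

-- ===== CLAIM (what is proved, stated in full; the proofs are below) =====
def Claim_equal_get_keyphrases : Prop := ∀ (y_pred : List Int) (feature_names : List String), Dom_get_keyphrases y_pred feature_names → Pre_get_keyphrases y_pred feature_names → Spec_get_keyphrases y_pred feature_names (get_keyphrases y_pred feature_names)

-- ===== LEMMAS AND PROOFS =====

-- A's loop, started at index c with accumulator acc, appends the next (count 1) names.
theorem getk_loopA (feature_names : List String) :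
    ∀ (ys : List Int) (acc : List String) (c : ℕ),
      c + ys.count 1 ≤ feature_names.length →
      (ys.foldl
        (fun (st : List String × Int) (label : Int) =>
          if label = 1 then
            match PySem.List.pyGet? feature_names st.2 with
            | some v => (st.1 ++ [v], st.2 + 1)
            | none => st
          else st)
        (acc, (c : Int))).1
      = acc ++ (feature_names.drop c).take (ys.count 1) := by
  intro ys
  induction ys with
  | nil => intro acc c _; simp
  | cons y ys ih =>
    intro acc c h
    by_cases hy : y = 1
    · subst hy
      have hcount : (1 :: ys).count 1 = ys.count 1 + 1 := by simp
      have hc : c < feature_names.length := by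
        rw [hcount] at h; omega
      have hget : PySem.List.pyGet? feature_names (c : Int) = some feature_names[c] :=
        PySem.List.pyGet?_ofNat feature_names c hc
      have hstep : ((c : Int) + 1) = ((c + 1 : ℕ) : Int) := by push_cast; ring
      simp only [List.foldl_cons, hget, hstep, reduceIte]
      rw [ih (acc ++ [feature_names[c]]) (c + 1) (by rw [hcount] at h; omega)]
      rw [hcount, List.drop_eq_getElem_cons hc, List.take_succ_cons]
      simp
    · simp only [List.foldl_cons, if_neg hy]
      rw [ih acc c (by simp [hy] at h ⊢; omega)]
      simp [hy]

-- B's comprehension over range(k) with k ≤ len is take k.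
theorem getk_rangeB (feature_names : List String) :
    ∀ (k : ℕ), k ≤ feature_names.length →
      (PySem.List.pyRange 0 (k : Int) 1).map
        (fun j => (PySem.List.pyGet? feature_names j).getD "")
      = feature_names.take k := by
  intro k
  induction k with
  | zero => intro _; simp
  | succ n ih =>
    intro h
    have hr : PySem.List.pyRange 0 ((n : Int) + 1) 1
        = PySem.List.pyRange 0 (n : Int) 1 ++ [(n : Int)] :=
      PySem.List.pyRange_one_succ_right (by positivity)
    have hn : n < feature_names.length := by omega
    have hget : PySem.List.pyGet? feature_names (n : Int) = some feature_names[n] :=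
      PySem.List.pyGet?_ofNat feature_names n hn
    have hcast : ((n + 1 : ℕ) : Int) = (n : Int) + 1 := by push_cast; ring
    rw [hcast, hr, List.map_append, ih (by omega)]
    have htk : feature_names.take (n + 1) = feature_names.take n ++ [feature_names[n]] := by
      rw [List.take_add_one]
      simp [List.getElem?_eq_getElem hn]
    rw [htk]
    simp [hget]

-- B's counter computes the count of 1s.
theorem getk_count (ys : List Int) :
    ∀ (s : Int), ys.foldl (fun s label => if label = 1 then s + 1 else s) s
      = s + (ys.count 1 : ℕ) := by
  induction ys with
  | nil => intro s; simp
  | cons y ys ih =>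
    intro s
    by_cases hy : y = 1
    · subst hy; simp only [List.foldl_cons, reduceIte, ih]
      simp; ring
    · simp only [List.foldl_cons, if_neg hy, ih]
      simp [hy]

-- ===== VERDICT (by name: the statement is the Claim_ definition above) =====
theorem get_keyphrases_spec : Claim_equal_get_keyphrases := by
  intro y_pred feature_names _ hpre
  unfold Spec_get_keyphrases get_keyphrases get_keyphrases_alt
  have hA := getk_loopA feature_names y_pred [] 0 (by simpa using hpre)
  simp only [Nat.cast_zero] at hA
  rw [hA]
  rw [getk_count y_pred 0]
  rw [show ((0 : Int) + (y_pred.count 1 : ℕ)) = ((y_pred.count 1 : ℕ) : Int) by ring]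
  rw [getk_rangeB feature_names (y_pred.count 1) hpre]
  simp
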